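-- pv_equiv track=rewrite | github.com/JonOrnBrynjarsson/AdventOfCode2021 | Day10Part1.py | recurseCheck
-- ===== SOURCE A (Python) =====
-- def recurseCheck(Open, Left, Score):
--     if not Left: return 0
--     currSign = Left[0]
--     if currSign in ('(','[','{','<'):
--         Open.append(currSign)
--         Left1 = Left.replace(currSign, '', 1)
--         return recurseCheck(Open, Left1, Score)
--     elif currSign in (')',']','}','>'):
--         checkOpen = Open.pop()
--         if ((checkOpen == '(' and currSign == ')') or
--             (checkOpen == '[' and currSign == ']') or
--             (checkOpen == '{' and currSign == '}') or
--             (checkOpen == '<' and currSign == '>')):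
--             Left1 = Left.replace(currSign, '', 1)
--             return recurseCheck(Open, Left1, Score)
--         else:
--             if currSign == ')': return 3
--             elif currSign == ']': return 57
--             elif currSign == '}': return 1197
--             elif currSign == '>': return 25137
--             else: return -1
--     else: return -1
-- ===== SOURCE B (Python) =====
-- def recurseCheck(Open, Left, Score):
--     # Single linear pass with an explicit stack (Open itself, so the caller
--     # observes the same in-place mutation as the original).
--     pairs = {')': '(', ']': '[', '}': '{', '>': '<'}
--     scores = {')': 3, ']': 57, '}': 1197, '>': 25137}
--     for ch in Left:
--         if ch in '([{<':
--             Open.append(ch)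
--         else:
--             opn = pairs.get(ch)
--             if opn is None:
--                 return -1
--             if Open.pop() != opn:
--                 return scores[ch]
--     return 0
-- ===== Notes on version B (the rewrite author's own statement) =====
-- stated objective: simpler
-- what changed: Replaces A's recursion, which rebuilds the remaining string with str.replace at every character, by a single iterative pass over the string with an explicit stack and dict lookups for the bracket pairs and scores.
-- outside the precondition, e.g. on recurseCheck([], ')', 0): A raises IndexError, B raises IndexError
import Mathlib
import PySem

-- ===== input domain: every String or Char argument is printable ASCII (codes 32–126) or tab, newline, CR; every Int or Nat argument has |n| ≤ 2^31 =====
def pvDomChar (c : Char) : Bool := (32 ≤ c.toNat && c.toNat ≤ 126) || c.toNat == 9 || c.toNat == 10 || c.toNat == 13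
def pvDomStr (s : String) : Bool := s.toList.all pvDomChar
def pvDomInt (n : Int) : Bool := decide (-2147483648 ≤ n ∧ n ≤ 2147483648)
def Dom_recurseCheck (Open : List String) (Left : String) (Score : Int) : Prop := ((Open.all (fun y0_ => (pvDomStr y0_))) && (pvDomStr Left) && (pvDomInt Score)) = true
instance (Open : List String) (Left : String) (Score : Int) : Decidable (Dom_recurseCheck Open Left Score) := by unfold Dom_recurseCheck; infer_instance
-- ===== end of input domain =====

-- B replaces A's recursion (which rebuilds the string with str.replace at every step) by a
-- single iterative pass with an explicit stack; equivalence is about the RETURN value only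
-- (both A and B mutate Open in place the same way).

-- ===== PORT A =====
-- Left.replace(currSign, '', 1): exact port of str.replace for a single-char pattern with
-- count 1 — removes the first occurrence of the character.
def pvReplaceOnce (l : List Char) (c : Char) : List Char :=
  match l with
  | [] => []
  | x :: xs => if x = c then xs else x :: pvReplaceOnce xs c

-- the recursion of A, on Left as List Char (Python recurses on the string)
def recurseCheckA (Open : List String) (Left : List Char) (Score : Int) : Int :=
  match Left with
  | [] => 0
  | currSign :: rest =>
    if currSign = '(' ∨ currSign = '[' ∨ currSign = '{' ∨ currSign = '<' then
      recurseCheckA (Open ++ [String.ofList [currSign]]) (pvReplaceOnce (currSign :: rest) currSign) Score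
    else if currSign = ')' ∨ currSign = ']' ∨ currSign = '}' ∨ currSign = '>' then
      match PySem.List.pop? Open with
      | none => 0  -- Python raises IndexError here; excluded by Pre_
      | some (checkOpen, Open1) =>
        if (checkOpen = "(" ∧ currSign = ')') ∨ (checkOpen = "[" ∧ currSign = ']') ∨
           (checkOpen = "{" ∧ currSign = '}') ∨ (checkOpen = "<" ∧ currSign = '>') then
          recurseCheckA Open1 (pvReplaceOnce (currSign :: rest) currSign) Score
        else
          if currSign = ')' then 3
          else if currSign = ']' then 57
          else if currSign = '}' then 1197
          else if currSign = '>' then 25137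
          else -1
    else -1
termination_by Left.length
decreasing_by all_goals simp_all [pvReplaceOnce]

def recurseCheck (Open : List String) (Left : String) (Score : Int) : Int :=
  recurseCheckA Open Left.toList Score

-- ===== PORT B =====
def pvPairs : PySem.Dict Char String := PySem.Dict.ofList [(')', "("), (']', "["), ('}', "{"), ('>', "<")]
def pvScores : PySem.Dict Char Int := PySem.Dict.ofList [(')', 3), (']', 57), ('}', 1197), ('>', 25137)]

-- the for-loop of B: one pass over the characters, stack threaded through
-- ('ch in '([{<'' is ported as membership of the character in those four; exact for single chars)
def recurseCheckLoop (stack : List String) : List Char → Int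
  | [] => 0
  | ch :: rest =>
    if ['(', '[', '{', '<'].contains ch then
      recurseCheckLoop (stack ++ [String.ofList [ch]]) rest
    else
      match PySem.Dict.get? pvPairs ch with
      | none => -1
      | some opn =>
        match PySem.List.pop? stack with
        | none => 0  -- Python raises IndexError here; excluded by Pre_
        | some (top, stack1) =>
          if top ≠ opn then PySem.Dict.getD pvScores ch 0
          else recurseCheckLoop stack1 rest

def recurseCheck_alt (Open : List String) (Left : String) (Score : Int) : Int :=
  recurseCheckLoop Open Left.toList

-- ===== PRECONDITION & SPEC =====
-- Pre_ excludes exactly the inputs on which A raises IndexError (list.pop() on an empty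
-- stack: a closing bracket is reached with nothing left to pop before the scan stops);
-- B raises the same IndexError there.  pvNoEmptyPop states that crash-freedom condition.
def pvNoEmptyPop (stack : List String) : List Char → Bool
  | [] => true
  | c :: rest =>
    if c = '(' ∨ c = '[' ∨ c = '{' ∨ c = '<' then
      pvNoEmptyPop (stack ++ [String.ofList [c]]) rest
    else if c = ')' ∨ c = ']' ∨ c = '}' ∨ c = '>' then
      match stack.getLast? with
      | none => false
      | some top =>
        if (top = "(" ∧ c = ')') ∨ (top = "[" ∧ c = ']') ∨
           (top = "{" ∧ c = '}') ∨ (top = "<" ∧ c = '>') then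
          pvNoEmptyPop stack.dropLast rest
        else true
    else true

def Pre_recurseCheck (Open : List String) (Left : String) (Score : Int) : Prop :=
  pvNoEmptyPop Open Left.toList = true

instance (Open : List String) (Left : String) (Score : Int) : Decidable (Pre_recurseCheck Open Left Score) := by
  unfold Pre_recurseCheck; infer_instance

def pvWitness_recurseCheck : List String × String × Int := (["("], "([]{}<>)x", 0)

def Spec_recurseCheck (Open : List String) (Left : String) (Score : Int) (out : Int) : Prop := out = recurseCheck_alt Open Left Score
instance (Open : List String) (Left : String) (Score : Int) (out : Int) : Decidable (Spec_recurseCheck Open Left Score out) := by unfold Spec_recurseCheck; infer_instance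

-- ===== CLAIM (what is proved, stated in full; the proofs are below) =====
def Claim_equal_recurseCheck : Prop := ∀ (Open : List String) (Left : String) (Score : Int), Dom_recurseCheck Open Left Score → Pre_recurseCheck Open Left Score → Spec_recurseCheck Open Left Score (recurseCheck Open Left Score)

-- ===== LEMMAS AND PROOFS =====

theorem pvReplaceOnce_head (c : Char) (rest : List Char) :
    pvReplaceOnce (c :: rest) c = rest := by
  simp [pvReplaceOnce]

theorem recurseCheck_agree (Left : List Char) :
    ∀ (Open : List String) (Score : Int), pvNoEmptyPop Open Left = true →
      recurseCheckA Open Left Score = recurseCheckLoop Open Left := by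
  induction Left with
  | nil => intro Open Score _; simp [recurseCheckA, recurseCheckLoop]
  | cons c rest ih =>
    intro Open Score hpre
    rw [recurseCheckA, recurseCheckLoop]
    by_cases hop : c = '(' ∨ c = '[' ∨ c = '{' ∨ c = '<'
    · have hmem : ['(', '[', '{', '<'].contains c = true := by
        simp only [List.contains_eq_mem, decide_eq_true_eq, List.mem_cons]
        simpa using hop
      rw [if_pos hop, if_pos hmem, pvReplaceOnce_head]
      apply ih
      rw [pvNoEmptyPop, if_pos hop] at hpre
      exact hpre
    · have hmem : ¬ (['(', '[', '{', '<'].contains c = true) := by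
        simp only [List.contains_eq_mem, decide_eq_true_eq, List.mem_cons]
        simpa using hop
      by_cases hcl : c = ')' ∨ c = ']' ∨ c = '}' ∨ c = '>'
      · have hne : Open ≠ [] := by
          intro h
          rw [pvNoEmptyPop, if_neg hop, if_pos hcl] at hpre
          subst h; simp at hpre
        obtain ⟨pre, top, hOpen⟩ : ∃ pre top, Open = pre ++ [top] := by
          rcases List.eq_nil_or_concat Open with h | ⟨pre, top, h⟩
          · exact absurd h hne
          · exact ⟨pre, top, by simpa [List.concat_eq_append] using h⟩
        subst hOpen
        rw [pvNoEmptyPop, if_neg hop, if_pos hcl] at hpre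
        simp only [List.getLast?_concat, List.dropLast_concat] at hpre
        rw [if_neg hop, if_pos hcl, if_neg hmem, PySem.List.pop?_last]
        rcases hcl with h | h | h | h <;> subst h
        all_goals first
          | rw [show PySem.Dict.get? pvPairs ')' = some "(" from by decide]
          | rw [show PySem.Dict.get? pvPairs ']' = some "[" from by decide]
          | rw [show PySem.Dict.get? pvPairs '}' = some "{" from by decide]
          | rw [show PySem.Dict.get? pvPairs '>' = some "<" from by decide]
        all_goals dsimp only
        · by_cases hm : top = "("
          · have hA : (top = "(" ∧ ')' = ')') ∨ (top = "[" ∧ ')' = ']') ∨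
                (top = "{" ∧ ')' = '}') ∨ (top = "<" ∧ ')' = '>') := by simp [hm]
            have hB : ¬ top ≠ "(" := by simp [hm]
            rw [if_pos hA, pvReplaceOnce_head, if_neg hB]
            exact ih _ Score (by rwa [if_pos hA] at hpre)
          · have hA : ¬ ((top = "(" ∧ ')' = ')') ∨ (top = "[" ∧ ')' = ']') ∨
                (top = "{" ∧ ')' = '}') ∨ (top = "<" ∧ ')' = '>')) := by simp [hm]
            have hB : top ≠ "(" := hm
            rw [if_neg hA, if_pos hB]
            decide
        · by_cases hm : top = "["
          · have hA : (top = "(" ∧ ']' = ')') ∨ (top = "[" ∧ ']' = ']') ∨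
                (top = "{" ∧ ']' = '}') ∨ (top = "<" ∧ ']' = '>') := by simp [hm]
            have hB : ¬ top ≠ "[" := by simp [hm]
            rw [if_pos hA, pvReplaceOnce_head, if_neg hB]
            exact ih _ Score (by rwa [if_pos hA] at hpre)
          · have hA : ¬ ((top = "(" ∧ ']' = ')') ∨ (top = "[" ∧ ']' = ']') ∨
                (top = "{" ∧ ']' = '}') ∨ (top = "<" ∧ ']' = '>')) := by simp [hm]
            have hB : top ≠ "[" := hm
            rw [if_neg hA, if_pos hB]
            decide
        · by_cases hm : top = "{"
          · have hA : (top = "(" ∧ '}' = ')') ∨ (top = "[" ∧ '}' = ']') ∨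
                (top = "{" ∧ '}' = '}') ∨ (top = "<" ∧ '}' = '>') := by simp [hm]
            have hB : ¬ top ≠ "{" := by simp [hm]
            rw [if_pos hA, pvReplaceOnce_head, if_neg hB]
            exact ih _ Score (by rwa [if_pos hA] at hpre)
          · have hA : ¬ ((top = "(" ∧ '}' = ')') ∨ (top = "[" ∧ '}' = ']') ∨
                (top = "{" ∧ '}' = '}') ∨ (top = "<" ∧ '}' = '>')) := by simp [hm]
            have hB : top ≠ "{" := hm
            rw [if_neg hA, if_pos hB]
            decide
        · by_cases hm : top = "<"
          · have hA : (top = "(" ∧ '>' = ')') ∨ (top = "[" ∧ '>' = ']') ∨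
                (top = "{" ∧ '>' = '}') ∨ (top = "<" ∧ '>' = '>') := by simp [hm]
            have hB : ¬ top ≠ "<" := by simp [hm]
            rw [if_pos hA, pvReplaceOnce_head, if_neg hB]
            exact ih _ Score (by rwa [if_pos hA] at hpre)
          · have hA : ¬ ((top = "(" ∧ '>' = ')') ∨ (top = "[" ∧ '>' = ']') ∨
                (top = "{" ∧ '>' = '}') ∨ (top = "<" ∧ '>' = '>')) := by simp [hm]
            have hB : top ≠ "<" := hm
            rw [if_neg hA, if_pos hB]
            decide
      · have hg : PySem.Dict.get? pvPairs c = none := by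
          simp only [not_or] at hcl
          obtain ⟨h1, h2, h3, h4⟩ := hcl
          have h1' : ¬ (')' = c) := fun h => h1 h.symm
          have h2' : ¬ (']' = c) := fun h => h2 h.symm
          have h3' : ¬ ('}' = c) := fun h => h3 h.symm
          have h4' : ¬ ('>' = c) := fun h => h4 h.symm
          rw [show pvPairs = PySem.Dict.mk [(')', "("), (']', "["), ('}', "{"), ('>', "<")] from by decide]
          simp [PySem.Dict.get?, h1', h2', h3', h4']
        rw [if_neg hop, if_neg hcl, if_neg hmem, hg]

-- ===== VERDICT (by name: the statement is the Claim_ definition above) =====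
theorem recurseCheck_spec : Claim_equal_recurseCheck := by
  intro Open Left Score _ hpre
  unfold Spec_recurseCheck recurseCheck recurseCheck_alt
  exact recurseCheck_agree Left.toList Open Score hpre
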